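-- pv_equiv track=rewrite | github.com/Xu109/data_structure | 6.29/汉明距离总和.py | hamingDistanceSum2
-- ===== SOURCE A (Python) =====
-- from typing import List
--
-- def hamingDistanceSum2(nums: List) -> int:
--     res = 0
--     for i in range(32):
--         count_0 = 0
--         count_1 = 0
--         for j in range(len(nums)):
--             if (nums[j] >> i) & 1:
--                 count_1 += 1
--             else:
--                 count_0 += 1
--         res += count_0 * count_1
--     return res
-- ===== SOURCE B (Python) =====
-- from typing import List
--
-- def hamingDistanceSum2(nums: List) -> int:
--     total = 0
--     for k, x in enumerate(nums):
--         for y in nums[:k]: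
--             v = x ^ y
--             for _ in range(32):
--                 total += v & 1
--                 v >>= 1
--     return total
-- ===== Notes on version B (the rewrite author's own statement) =====
-- stated objective: alternative
-- what changed: A counts zeros and ones of each of the 32 bit positions across the whole list and adds count_0*count_1 per bit; B instead computes the sum directly from its definition, iterating over all pairs (earlier, current) and adding the popcount of the low 32 bits of x ^ y via a 32-step shift-and-mask loop.
import Mathlib
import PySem

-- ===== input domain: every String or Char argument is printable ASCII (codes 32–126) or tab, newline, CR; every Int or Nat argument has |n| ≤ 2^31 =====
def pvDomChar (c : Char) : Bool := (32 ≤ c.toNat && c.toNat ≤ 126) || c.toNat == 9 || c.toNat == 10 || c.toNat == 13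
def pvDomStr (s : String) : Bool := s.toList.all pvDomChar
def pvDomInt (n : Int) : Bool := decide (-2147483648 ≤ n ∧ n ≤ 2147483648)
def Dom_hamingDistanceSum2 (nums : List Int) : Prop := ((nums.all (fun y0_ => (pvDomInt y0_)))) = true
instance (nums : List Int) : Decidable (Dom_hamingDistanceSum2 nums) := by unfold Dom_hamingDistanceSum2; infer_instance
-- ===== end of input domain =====

-- B replaces A's per-bit counting (count_0 * count_1 over the 32 bit positions) by the direct
-- pairwise definition: for every pair it adds the popcount of the low 32 bits of x ^ y,
-- computed by a 32-step shift-and-mask loop (objective: alternative, not faster).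

-- ===== PORT A =====
def hamingDistanceSum2 (nums : List Int) : Int :=
  (PySem.List.pyRange 0 32 1).foldl (fun res i =>
    let p := (PySem.List.pyRange 0 (nums.length : Int) 1).foldl
      (fun (c : Int × Int) j =>
        if PySem.Int.band ((PySem.List.pyGetD nums j 0) >>> i.toNat) 1 ≠ 0 then (c.1, c.2 + 1)
        else (c.1 + 1, c.2)) ((0 : Int), (0 : Int))
    res + p.1 * p.2) 0

-- ===== PORT B =====
def hamingDistanceSum2_alt (nums : List Int) : Int :=
  (PySem.List.enumerate nums 0).foldl (fun total kx =>
    (PySem.List.slice nums none (some kx.1)).foldl (fun total y =>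
      ((List.range 32).foldl
        (fun (s : Int × Int) _ => (s.1 + PySem.Int.band s.2 1, s.2 >>> (1 : Nat)))
        (total, PySem.Int.bxor kx.2 y)).1) total) 0

-- ===== PRECONDITION & SPEC =====
def Spec_hamingDistanceSum2 (nums : List Int) (out : Int) : Prop := out = hamingDistanceSum2_alt nums
instance (nums : List Int) (out : Int) : Decidable (Spec_hamingDistanceSum2 nums out) := by unfold Spec_hamingDistanceSum2; infer_instance

-- ===== CLAIM (what is proved, stated in full; the proofs are below) =====
def Claim_equal_hamingDistanceSum2 : Prop := ∀ (nums : List Int), Dom_hamingDistanceSum2 nums → Spec_hamingDistanceSum2 nums (hamingDistanceSum2 nums)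

-- ===== LEMMAS AND PROOFS =====

-- bit i of v: the Python expression (v >> i) & 1
def pvBitN (v : Int) (i : Nat) : Int := PySem.Int.band (v >>> i) 1

-- number of elements of nums with bit i set
def pvOnesN (nums : List Int) (i : Nat) : Int := (nums.map (fun x => pvBitN x i)).sum

-- popcount of the low 32 bits of v
def pvB32 (v : Int) : Int := ((List.range 32).map (fun i => pvBitN v i)).sum

theorem pvBitN01 (v : Int) (i : Nat) : pvBitN v i = 0 ∨ pvBitN v i = 1 := by
  unfold pvBitN
  rw [PySem.Int.band_one]
  exact PySem.Int.mod_two_eq _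

theorem pvOnesN_cons (x : Int) (xs : List Int) (i : Nat) :
    pvOnesN (x :: xs) i = pvBitN x i + pvOnesN xs i := by
  simp [pvOnesN]

theorem pvOnesN_append (ys : List Int) (x : Int) (i : Nat) :
    pvOnesN (ys ++ [x]) i = pvOnesN ys i + pvBitN x i := by
  simp [pvOnesN]

-- ===== A-side characterisation =====

theorem pvInnerFold (i : Nat) (nums : List Int) (a b : Int) :
    nums.foldl (fun (c : Int × Int) (num : Int) =>
        if PySem.Int.band (num >>> i) 1 ≠ 0 then (c.1, c.2 + 1)
        else (c.1 + 1, c.2)) (a, b)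
    = (a + ((nums.length : Int) - pvOnesN nums i), b + pvOnesN nums i) := by
  induction nums generalizing a b with
  | nil => simp [pvOnesN]
  | cons x xs ih =>
    have hb : PySem.Int.band (x >>> i) 1 = pvBitN x i := rfl
    rw [List.foldl_cons]
    rcases pvBitN01 x i with h | h
    · rw [hb, h, if_neg (by simp), ih]
      simp only [pvOnesN_cons, h, List.length_cons, Prod.mk.injEq]
      refine ⟨by push_cast; ring, by ring⟩
    · rw [hb, h, if_pos (by simp), ih]
      simp only [pvOnesN_cons, h, List.length_cons, Prod.mk.injEq]
      refine ⟨by push_cast; ring, by ring⟩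

theorem pvAInner (nums : List Int) (i : Nat) :
    (PySem.List.pyRange 0 (nums.length : Int) 1).foldl
      (fun (c : Int × Int) j =>
        if PySem.Int.band ((PySem.List.pyGetD nums j 0) >>> i) 1 ≠ 0 then (c.1, c.2 + 1)
        else (c.1 + 1, c.2)) ((0 : Int), (0 : Int))
    = ((nums.length : Int) - pvOnesN nums i, pvOnesN nums i) := by
  have h := PySem.List.foldl_pyRange_zero_pyGetD' nums 0
      (fun (c : Int × Int) (num : Int) =>
        if PySem.Int.band (num >>> i) 1 ≠ 0 then (c.1, c.2 + 1)
        else (c.1 + 1, c.2)) ((0 : Int), (0 : Int))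
  rw [h, pvInnerFold]
  simp

theorem pvRange32 : PySem.List.pyRange 0 32 1 = List.map (fun (k : Nat) => (k : Int)) (List.range 32) := by
  rw [PySem.List.pyRange_one]
  simp

theorem pvA_eq (nums : List Int) :
    hamingDistanceSum2 nums
      = ((List.range 32).map
          (fun i => ((nums.length : Int) - pvOnesN nums i) * pvOnesN nums i)).sum := by
  unfold hamingDistanceSum2
  simp only [Int.shiftRight_natCast_right]
  simp only [pvAInner]
  rw [PySem.List.foldl_add (PySem.List.pyRange 0 32 1)
      (fun i => ((nums.length : Int) - pvOnesN nums i.toNat) * pvOnesN nums i.toNat) 0]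
  rw [pvRange32, List.map_map, zero_add]
  apply congrArg List.sum
  apply List.map_congr_left
  intro k _
  simp

-- ===== B-side characterisation =====

theorem pvLoop (n : Nat) (t v : Int) :
    (List.range n).foldl
      (fun (s : Int × Int) _ => (s.1 + PySem.Int.band s.2 1, s.2 >>> (1 : Nat))) (t, v)
    = (t + ((List.range n).map (fun i => pvBitN v i)).sum, v >>> n) := by
  induction n with
  | zero => simp
  | succ n ih =>
    rw [List.range_succ, List.foldl_append, ih]
    simp only [List.foldl_cons, List.foldl_nil, List.map_append, List.map_cons, List.map_nil,
      List.sum_append, List.sum_cons, List.sum_nil, Prod.mk.injEq]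
    refine ⟨by unfold pvBitN; ring, (Int.shiftRight_add v n 1).symm⟩

theorem pvBxOO (m n : Nat) : PySem.Int.bxor (Int.ofNat m) (Int.ofNat n) = Int.ofNat (m ^^^ n) := by
  simp [PySem.Int.bxor]

theorem pvBxON (m n : Nat) : PySem.Int.bxor (Int.ofNat m) (Int.negSucc n) = Int.negSucc (m ^^^ n) := by
  simp [PySem.Int.bxor, Int.negSucc_eq, show ¬((n : Int) ≤ -1) by omega]
  omega

theorem pvBxNO (m n : Nat) : PySem.Int.bxor (Int.negSucc m) (Int.ofNat n) = Int.negSucc (m ^^^ n) := by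
  simp [PySem.Int.bxor, Int.negSucc_eq, show ¬((m : Int) ≤ -1) by omega]
  omega

theorem pvBxNN (m n : Nat) : PySem.Int.bxor (Int.negSucc m) (Int.negSucc n) = Int.ofNat (m ^^^ n) := by
  simp [PySem.Int.bxor, Int.negSucc_eq, show ¬((m : Int) ≤ -1) by omega,
    show ¬((n : Int) ≤ -1) by omega]

theorem pvNsShift (m : Nat) : (Int.negSucc m) >>> (1 : Nat) = Int.negSucc (m >>> 1) := rfl

theorem pvOnShift (m : Nat) : (Int.ofNat m) >>> (1 : Nat) = Int.ofNat (m >>> 1) := rfl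

theorem pvBxorShift (x y : Int) :
    (PySem.Int.bxor x y) >>> (1 : Nat) = PySem.Int.bxor (x >>> (1 : Nat)) (y >>> (1 : Nat)) := by
  cases x with
  | ofNat m =>
    cases y with
    | ofNat n => rw [pvBxOO, pvOnShift, pvOnShift, pvOnShift, pvBxOO, Nat.shiftRight_xor_distrib]
    | negSucc n => rw [pvBxON, pvOnShift, pvNsShift, pvNsShift, pvBxON, Nat.shiftRight_xor_distrib]
  | negSucc m =>
    cases y with
    | ofNat n => rw [pvBxNO, pvNsShift, pvNsShift, pvOnShift, pvBxNO, Nat.shiftRight_xor_distrib]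
    | negSucc n => rw [pvBxNN, pvNsShift, pvNsShift, pvOnShift, pvBxNN, Nat.shiftRight_xor_distrib]

theorem pvNatXorMod2 (a b : Nat) : (a ^^^ b) % 2 = (a % 2 + b % 2) % 2 := by
  have h := Nat.testBit_xor a b 0
  simp only [Nat.testBit_zero] at h
  rcases Nat.mod_two_eq_zero_or_one a with ha | ha <;> rcases Nat.mod_two_eq_zero_or_one b with hb | hb <;>
    simp [ha, hb] at h ⊢ <;> omega

theorem pvBit0O (m : Nat) : pvBitN (Int.ofNat m) 0 = ((m % 2 : Nat) : Int) := by
  unfold pvBitN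
  rw [PySem.Int.band_one, PySem.Int.mod_eq_emod_of_pos (by norm_num)]
  show (Int.ofNat (m >>> 0)) % 2 = _
  rw [Int.ofNat_eq_natCast, Nat.shiftRight_zero]
  omega

theorem pvBit0N (m : Nat) : pvBitN (Int.negSucc m) 0 = 1 - ((m % 2 : Nat) : Int) := by
  unfold pvBitN
  rw [PySem.Int.band_one, PySem.Int.mod_eq_emod_of_pos (by norm_num)]
  show (Int.negSucc (m >>> 0)) % 2 = _
  rw [Int.negSucc_eq, Nat.shiftRight_zero]
  omega

theorem pvBxorParity (x y : Int) :
    pvBitN (PySem.Int.bxor x y) 0 = pvBitN x 0 + pvBitN y 0 - 2 * pvBitN x 0 * pvBitN y 0 := by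
  cases x with
  | ofNat m =>
    cases y with
    | ofNat n =>
      rw [pvBxOO, pvBit0O, pvBit0O, pvBit0O]
      have hx := pvNatXorMod2 m n
      rcases Nat.mod_two_eq_zero_or_one m with hm | hm <;> rcases Nat.mod_two_eq_zero_or_one n with hn | hn <;>
        rw [hm, hn] at hx <;> norm_num at hx <;> simp [hm, hn, hx]
    | negSucc n =>
      rw [pvBxON, pvBit0O, pvBit0N, pvBit0N]
      have hx := pvNatXorMod2 m n
      rcases Nat.mod_two_eq_zero_or_one m with hm | hm <;> rcases Nat.mod_two_eq_zero_or_one n with hn | hn <;>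
        rw [hm, hn] at hx <;> norm_num at hx <;> simp [hm, hn, hx]
  | negSucc m =>
    cases y with
    | ofNat n =>
      rw [pvBxNO, pvBit0N, pvBit0N, pvBit0O]
      have hx := pvNatXorMod2 m n
      rcases Nat.mod_two_eq_zero_or_one m with hm | hm <;> rcases Nat.mod_two_eq_zero_or_one n with hn | hn <;>
        rw [hm, hn] at hx <;> norm_num at hx <;> simp [hm, hn, hx]
    | negSucc n =>
      rw [pvBxNN, pvBit0N, pvBit0N, pvBit0O]
      have hx := pvNatXorMod2 m n
      rcases Nat.mod_two_eq_zero_or_one m with hm | hm <;> rcases Nat.mod_two_eq_zero_or_one n with hn | hn <;>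
        rw [hm, hn] at hx <;> norm_num at hx <;> simp [hm, hn, hx]

theorem pvBitN_bxor (i : Nat) (x y : Int) :
    pvBitN (PySem.Int.bxor x y) i
      = pvBitN x i + pvBitN y i - 2 * pvBitN x i * pvBitN y i := by
  induction i generalizing x y with
  | zero => exact pvBxorParity x y
  | succ i ih =>
    have hs : ∀ (w : Int), pvBitN w (i + 1) = pvBitN (w >>> (1 : Nat)) i := by
      intro w
      unfold pvBitN
      rw [Nat.add_comm i 1, Int.shiftRight_add]
    rw [hs, hs, hs, pvBxorShift, ih]

theorem pvInnerB (ws : List Int) (x t : Int) :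
    ws.foldl (fun total y =>
        ((List.range 32).foldl
          (fun (s : Int × Int) _ => (s.1 + PySem.Int.band s.2 1, s.2 >>> (1 : Nat)))
          (total, PySem.Int.bxor x y)).1) t
      = t + (ws.map (fun y => pvB32 (PySem.Int.bxor x y))).sum := by
  induction ws generalizing t with
  | nil => simp
  | cons w ws ih =>
    rw [List.foldl_cons, pvLoop, ih]
    simp [pvB32]
    ring

theorem pvEnumAppend (ys : List Int) (x : Int) (s : Int) :
    PySem.List.enumerate (ys ++ [x]) s
      = PySem.List.enumerate ys s ++ [(s + (ys.length : Int), x)] := by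
  induction ys generalizing s with
  | nil => simp [PySem.List.enumerate_cons, PySem.List.enumerate_nil]
  | cons y ys ih =>
    simp only [List.cons_append, PySem.List.enumerate_cons, ih, List.length_cons]
    rw [show (((ys.length + 1 : Nat)) : Int) = 1 + (ys.length : Int) from by push_cast; ring,
      ← add_assoc]

theorem pvAltSnoc (ys : List Int) (x : Int) :
    hamingDistanceSum2_alt (ys ++ [x])
      = hamingDistanceSum2_alt ys + (ys.map (fun y => pvB32 (PySem.Int.bxor x y))).sum := by
  unfold hamingDistanceSum2_alt
  rw [pvEnumAppend, List.foldl_append]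
  have hcong : ∀ (init : Int),
      (PySem.List.enumerate ys 0).foldl (fun total kx =>
        (PySem.List.slice (ys ++ [x]) none (some kx.1)).foldl (fun total y =>
          ((List.range 32).foldl
            (fun (s : Int × Int) _ => (s.1 + PySem.Int.band s.2 1, s.2 >>> (1 : Nat)))
            (total, PySem.Int.bxor kx.2 y)).1) total) init
      = (PySem.List.enumerate ys 0).foldl (fun total kx =>
        (PySem.List.slice ys none (some kx.1)).foldl (fun total y =>
          ((List.range 32).foldl
            (fun (s : Int × Int) _ => (s.1 + PySem.Int.band s.2 1, s.2 >>> (1 : Nat)))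
            (total, PySem.Int.bxor kx.2 y)).1) total) init := by
    intro init
    apply PySem.List.foldl_congr_mem
    intro acc kx hkx
    have hmem : kx.1 ∈ (PySem.List.enumerate ys 0).map (fun p => p.1) :=
      List.mem_map_of_mem hkx
    rw [PySem.List.map_fst_enumerate, zero_add] at hmem
    obtain ⟨h0, hlt⟩ := PySem.List.mem_pyRange_one.mp hmem
    rw [PySem.List.slice_to _ h0, PySem.List.slice_to _ h0,
      List.take_append_of_le_length (by omega)]
  rw [hcong]
  simp only [List.foldl_cons, List.foldl_nil, zero_add]
  rw [PySem.List.slice_to _ (by positivity), Int.toNat_natCast, List.take_left, pvInnerB]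

theorem pvSumSwap (ys : List Int) (L : List Nat) (f : Nat → Int → Int) :
    (ys.map (fun y => (L.map (fun i => f i y)).sum)).sum
      = (L.map (fun i => (ys.map (fun y => f i y)).sum)).sum := by
  induction ys with
  | nil => simp
  | cons y ys ih =>
    simp only [List.map_cons, List.sum_cons, ih]
    rw [← PySem.List.sum_map_add_int]

theorem pvSumAffine (ws : List Int) (g : Int → Int) (b : Int) :
    (ws.map (fun y => b + g y - 2 * b * g y)).sum
      = (ws.length : Int) * b + (ws.map g).sum - 2 * b * (ws.map g).sum := by
  induction ws with
  | nil => simp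
  | cons w ws ih =>
    simp only [List.map_cons, List.sum_cons, ih, List.length_cons]
    push_cast
    ring

theorem pvMain (nums : List Int) :
    hamingDistanceSum2_alt nums
      = ((List.range 32).map
          (fun i => ((nums.length : Int) - pvOnesN nums i) * pvOnesN nums i)).sum := by
  induction nums using List.reverseRecOn with
  | nil => decide
  | append_singleton ys x ih =>
    rw [pvAltSnoc, ih]
    have h1 : (ys.map (fun y => pvB32 (PySem.Int.bxor x y))).sum
        = ((List.range 32).map
            (fun i => (ys.length : Int) * pvBitN x i + pvOnesN ys i
              - 2 * pvBitN x i * pvOnesN ys i)).sum := by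
      have h2 : (ys.map (fun y => pvB32 (PySem.Int.bxor x y))).sum
          = (ys.map (fun y => ((List.range 32).map
              (fun i => pvBitN x i + pvBitN y i - 2 * pvBitN x i * pvBitN y i)).sum)).sum := by
        congr 1
        apply List.map_congr_left
        intro y _
        unfold pvB32
        congr 1
        apply List.map_congr_left
        intro i _
        rw [pvBitN_bxor]
      rw [h2, pvSumSwap ys (List.range 32)
          (fun i y => pvBitN x i + pvBitN y i - 2 * pvBitN x i * pvBitN y i)]
      congr 1
      apply List.map_congr_left
      intro i _
      rw [pvSumAffine ys (fun y => pvBitN y i) (pvBitN x i)]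
      unfold pvOnesN
      ring
    rw [h1, ← PySem.List.sum_map_add_int]
    congr 1
    apply List.map_congr_left
    intro i _
    rcases pvBitN01 x i with h | h <;>
      rw [pvOnesN_append, h] <;> simp only [List.length_append, List.length_cons, List.length_nil] <;>
      push_cast <;> ring

-- ===== VERDICT (by name: the statement is the Claim_ definition above) =====
theorem hamingDistanceSum2_spec : Claim_equal_hamingDistanceSum2 := by
  intro nums _
  unfold Spec_hamingDistanceSum2
  rw [pvA_eq, pvMain]
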